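-- pv_equiv track=rewrite | github.com/svend4/meta | projects/hexmat/hexmat.py | linear_code_from_generator
-- ===== SOURCE A (Python) =====
-- def linear_code_from_generator(G):
--     """
--     Линейный код из порождающей матрицы G (k строк по 6 бит).
--     Кодовые слова = {Σ uᵢ·G[i] : u ∈ GF(2)^k} (линейные комбинации строк G).
--     Возвращает frozenset кодовых слов.
--     """
--     k = len(G)
--     codewords = set()
--     for u in range(1 << k):
--         word = 0
--         for i in range(k):
--             if (u >> i) & 1:
--                 word ^= G[i]
--         codewords.add(word)
--     return frozenset(codewords)
-- ===== SOURCE B (Python) =====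
-- def linear_code_from_generator(G):
--     """Same codewords, built as an incremental span: start from {0} and, for each
--     generator row, XOR it onto every word found so far (one XOR per pair instead
--     of re-deriving each word from its full bit-mask)."""
--     code = [0]            # distinct codewords in first-insertion order
--     members = {0}
--     for g in G:
--         for w in list(code):
--             x = w ^ g
--             if x not in members:
--                 members.add(x)
--                 code.append(x)
--     return frozenset(code)
-- ===== Notes on version B (the rewrite author's own statement) =====
-- stated objective: faster
-- what changed: A enumerates all 2^k bit-masks and rebuilds each codeword with an inner k-bit loop; B builds the span incrementally, XOR-ing each generator row onto the distinct codewords found so far (one XOR per pair, no mask enumeration).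
import Mathlib
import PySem

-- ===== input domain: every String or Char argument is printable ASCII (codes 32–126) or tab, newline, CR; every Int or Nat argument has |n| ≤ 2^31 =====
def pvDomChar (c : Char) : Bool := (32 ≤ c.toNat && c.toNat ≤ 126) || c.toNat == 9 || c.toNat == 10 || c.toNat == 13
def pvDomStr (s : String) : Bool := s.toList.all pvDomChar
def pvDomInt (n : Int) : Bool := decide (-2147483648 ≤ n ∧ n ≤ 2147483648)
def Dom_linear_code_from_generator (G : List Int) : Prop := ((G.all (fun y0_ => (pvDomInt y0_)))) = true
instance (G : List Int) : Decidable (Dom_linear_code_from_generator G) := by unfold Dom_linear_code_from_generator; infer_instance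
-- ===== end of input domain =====

-- B replaces A's 2^k-mask enumeration (inner k-bit loop per mask) by an incremental
-- span build: one XOR per (known word, generator row) pair, skipping seen words.

-- ===== PORT A =====
-- inner loop of A: word = 0; for i in range(k): if (u >> i) & 1: word ^= G[i]
def pvWordA (G : List Int) (k : Int) (u : Int) : Int :=
  (PySem.List.pyRange 0 k 1).foldl
    (fun w i =>
      if PySem.Int.band (u >>> i.toNat) 1 ≠ 0 then PySem.Int.bxor w (PySem.List.pyGetD G i 0)
      else w) 0

def linear_code_from_generator (G : List Int) : List Int :=
  (PySem.List.pyRange 0 ((1 : Int) <<< G.length) 1).foldl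
    (fun codewords u => PySem.Set.add codewords (pvWordA G (G.length : Int) u))
    PySem.Set.empty

-- ===== PORT B =====
def linear_code_from_generator_alt (G : List Int) : List Int :=
  G.foldl
    (fun code g => code.foldl (fun c w => PySem.Set.add c (PySem.Int.bxor w g)) code)
    (PySem.Set.ofList [0])

-- ===== PRECONDITION & SPEC =====
def Spec_linear_code_from_generator (G : List Int) (out : List Int) : Prop := out = linear_code_from_generator_alt G
instance (G : List Int) (out : List Int) : Decidable (Spec_linear_code_from_generator G out) := by unfold Spec_linear_code_from_generator; infer_instance

-- ===== CLAIM (what is proved, stated in full; the proofs are below) =====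
def Claim_equal_linear_code_from_generator : Prop := ∀ (G : List Int), Dom_linear_code_from_generator G → Spec_linear_code_from_generator G (linear_code_from_generator G)

-- ===== LEMMAS AND PROOFS =====

-- proof-side form of A's inner loop, over Nat masks and Nat.testBit
def pvWrd (gs : List Int) (n : Nat) : Int :=
  (List.range gs.length).foldl
    (fun w i => if n.testBit i then PySem.Int.bxor w (gs.getD i 0) else w) 0

lemma pv_band_shift (n i : Nat) :
    PySem.Int.band ((n : Int) >>> ((i : Nat) : Int)) 1 = if n.testBit i then 1 else 0 := by
  rw [Int.shiftRight_natCast]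
  have h2 := PySem.Int.band_natCast (n >>> i) 1
  have h3 : (n >>> i) &&& 1 = (n.testBit i).toNat := by
    rw [Nat.and_one_is_mod, Nat.shiftRight_eq_div_pow, Nat.toNat_testBit]
  rw [show ((1:Int) = ((1:Nat):Int)) from rfl, h2, h3]
  cases n.testBit i <;> simp

lemma pvWordA_eq (G : List Int) (n : Nat) :
    pvWordA G (G.length : Int) (n : Int) = pvWrd G n := by
  unfold pvWordA pvWrd
  rw [PySem.List.pyRange_zero_natCast, List.foldl_map]
  refine PySem.List.foldl_congr_mem _ _ _ _ ?_
  intro acc i hi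
  have hc : PySem.Int.band ((n : Int) >>> ((((i : Int)).toNat : Nat) : Int)) 1
      = if n.testBit i then 1 else 0 := by
    rw [Int.toNat_natCast]; exact pv_band_shift n i
  by_cases hb : n.testBit i
  · rw [if_pos (by rw [hc, if_pos hb]; exact one_ne_zero), if_pos hb,
      PySem.List.pyGetD_natCast]
  · rw [if_neg (by rw [hc, if_neg hb]; simp), if_neg hb]

-- A's outer loop in Nat form
lemma pvA_eq (G : List Int) :
    linear_code_from_generator G
      = (List.range (2 ^ G.length)).foldl
          (fun s n => PySem.Set.add s (pvWrd G n)) PySem.Set.empty := by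
  unfold linear_code_from_generator
  have hs : ((1 : Int) <<< G.length) = ((2 ^ G.length : Nat) : Int) := by
    simp [Int.shiftLeft_eq]
  rw [hs, PySem.List.pyRange_zero_natCast, List.foldl_map]
  refine PySem.List.foldl_congr_mem _ _ _ _ ?_
  intro acc n _
  rw [pvWordA_eq]

-- appending a row does not change the word of a low mask
lemma pvWrd_low (gs : List Int) (g : Int) (n : Nat) (hn : n < 2 ^ gs.length) :
    pvWrd (gs ++ [g]) n = pvWrd gs n := by
  unfold pvWrd
  rw [List.length_append, List.length_singleton, List.range_succ, List.foldl_append]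
  have hbit : n.testBit gs.length = false := Nat.testBit_lt_two_pow hn
  simp only [List.foldl_cons, List.foldl_nil, hbit]
  rw [if_neg (by simp)]
  refine PySem.List.foldl_congr_mem _ _ _ _ ?_
  intro acc i hi
  have hilt : i < gs.length := List.mem_range.mp hi
  rw [List.getD_append _ _ _ _ hilt]

-- appending a row: the word of a high mask is the low word xored with the row
lemma pvWrd_high (gs : List Int) (g : Int) (n : Nat) (hn : n < 2 ^ gs.length) :
    pvWrd (gs ++ [g]) (2 ^ gs.length + n) = PySem.Int.bxor (pvWrd gs n) g := by
  unfold pvWrd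
  rw [List.length_append, List.length_singleton, List.range_succ, List.foldl_append]
  have hbit : (2 ^ gs.length + n).testBit gs.length = true := by
    rw [Nat.testBit_two_pow_add_eq, Nat.testBit_lt_two_pow hn]; rfl
  have hget : (gs ++ [g]).getD gs.length 0 = g := by
    simp [List.getD]
  simp only [List.foldl_cons, List.foldl_nil, hbit]
  rw [if_pos trivial, hget]
  congr 1
  refine PySem.List.foldl_congr_mem _ _ _ _ ?_
  intro acc i hi
  have hilt : i < gs.length := List.mem_range.mp hi
  rw [Nat.testBit_two_pow_add_gt hilt, List.getD_append _ _ _ _ hilt]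

-- folding 'add (f x)' over a list only sees the first occurrence of each element
lemma pv_fold_add_dedup (f : Int → Int) (xs : List Int) :
    ∀ S : PySem.Set Int,
      xs.foldl (fun s x => PySem.Set.add s (f x)) S
        = (PySem.Set.ofList xs).foldl (fun s x => PySem.Set.add s (f x)) S := by
  induction xs using List.reverseRecOn with
  | nil => intro S; rfl
  | append_singleton xs x ih =>
    intro S
    rw [List.foldl_append, PySem.Set.ofList_append_singleton]
    by_cases hx : x ∈ xs
    · have hmem : x ∈ PySem.Set.ofList xs := (PySem.Set.mem_ofList xs x).mpr hx
      rw [PySem.Set.add_of_mem hmem, ← ih S]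
      have hfx : f x ∈ xs.foldl (fun s x => PySem.Set.add s (f x)) S := by
        rw [PySem.Set.mem_foldl_add xs f S]; exact Or.inr ⟨x, hx, rfl⟩
      simp only [List.foldl_cons, List.foldl_nil]
      exact PySem.Set.add_of_mem hfx
    · have hmem : x ∉ PySem.Set.ofList xs := fun h => hx ((PySem.Set.mem_ofList xs x).mp h)
      rw [PySem.Set.add_of_not_mem hmem, List.foldl_append, ← ih S]

-- main induction: A's Nat-form fold equals B's span fold, row by row from the right
lemma pv_main (gs : List Int) :
    (List.range (2 ^ gs.length)).foldl
        (fun s n => PySem.Set.add s (pvWrd gs n)) PySem.Set.empty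
      = gs.foldl
          (fun code g => code.foldl (fun c w => PySem.Set.add c (PySem.Int.bxor w g)) code)
          (PySem.Set.ofList [0]) := by
  induction gs using List.reverseRecOn with
  | nil => decide
  | append_singleton gs g ih =>
    have hlen : (gs ++ [g]).length = gs.length + 1 := by
      rw [List.length_append, List.length_singleton]
    rw [hlen, pow_succ, mul_two, List.range_add, List.foldl_append, List.foldl_map,
        List.foldl_append]
    -- first half: masks below 2^|gs| give the old code
    have hfirst :
        (List.range (2 ^ gs.length)).foldl
            (fun s n => PySem.Set.add s (pvWrd (gs ++ [g]) n)) PySem.Set.empty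
          = (List.range (2 ^ gs.length)).foldl
              (fun s n => PySem.Set.add s (pvWrd gs n)) PySem.Set.empty := by
      refine PySem.List.foldl_congr_mem _ _ _ _ ?_
      intro acc n hn
      rw [pvWrd_low gs g n (List.mem_range.mp hn)]
    rw [hfirst]
    -- second half: masks 2^|gs| + n give the old words xored with g
    have hsecond :
        ∀ S : PySem.Set Int,
        (List.range (2 ^ gs.length)).foldl
            (fun s n => PySem.Set.add s (pvWrd (gs ++ [g]) (2 ^ gs.length + n))) S
          = (List.range (2 ^ gs.length)).foldl
              (fun s n => PySem.Set.add s (PySem.Int.bxor (pvWrd gs n) g)) S := by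
      intro S
      refine PySem.List.foldl_congr_mem _ _ _ _ ?_
      intro acc n hn
      rw [pvWrd_high gs g n (List.mem_range.mp hn)]
    rw [hsecond]
    -- turn the mask fold into a fold over the word list, then dedup it
    set SA := (List.range (2 ^ gs.length)).foldl
        (fun s n => PySem.Set.add s (pvWrd gs n)) PySem.Set.empty with hSA
    have hws : SA = PySem.Set.ofList ((List.range (2 ^ gs.length)).map (pvWrd gs)) := by
      rw [hSA, PySem.Set.ofList_eq_foldl, List.foldl_map]; rfl
    have hstep :
        (List.range (2 ^ gs.length)).foldl
            (fun s n => PySem.Set.add s (PySem.Int.bxor (pvWrd gs n) g)) SA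
          = SA.foldl (fun c w => PySem.Set.add c (PySem.Int.bxor w g)) SA := by
      conv_lhs => rw [← List.foldl_map (f := pvWrd gs)
        (g := fun s w => PySem.Set.add s (PySem.Int.bxor w g))]
      rw [pv_fold_add_dedup (fun w => PySem.Int.bxor w g), ← hws]
    rw [hstep, List.foldl_cons, List.foldl_nil, ih]

-- ===== VERDICT (by name: the statement is the Claim_ definition above) =====
theorem linear_code_from_generator_spec : Claim_equal_linear_code_from_generator := by
  intro G _
  unfold Spec_linear_code_from_generator linear_code_from_generator_alt
  rw [pvA_eq, pv_main]
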